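-- pv_equiv track=rewrite | github.com/dfinson/codeplane | src/codeplane/index/_internal/extraction/python.py | _canonicalize_type
-- ===== SOURCE A (Python) =====
-- def _canonicalize_type(raw_type: str) -> str:
--     """Normalize Python type to canonical form."""
--     t = raw_type.strip()
--
--     # Normalize common aliases
--     replacements = {
--         "List[": "list[",
--         "Dict[": "dict[",
--         "Set[": "set[",
--         "Tuple[": "tuple[",
--         "Optional[": "opt[",
--         "Union[": "union[",
--     }
--     for old, new in replacements.items():
--         t = t.replace(old, new)
--
--     return t
-- ===== SOURCE B (Python) =====
-- def _canonicalize_type(raw_type: str) -> str: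
--     """Normalize Python type to canonical form (single left-to-right scan)."""
--     t = raw_type.strip()
--     aliases = (
--         ("List[", "list["),
--         ("Dict[", "dict["),
--         ("Set[", "set["),
--         ("Tuple[", "tuple["),
--         ("Optional[", "opt["),
--         ("Union[", "union["),
--     )
--     out = []
--     i = 0
--     n = len(t)
--     while i < n:
--         for old, new in aliases:
--             if t.startswith(old, i):
--                 out.append(new)
--                 i += len(old)
--                 break
--         else:
--             out.append(t[i])
--             i += 1
--     return "".join(out)
-- ===== Notes on version B (the rewrite author's own statement) =====
-- stated objective: alternative
-- what changed: A makes six sequential full-string .replace passes (one per alias); B strips once and then does a single left-to-right scan that at each position tries the six alias keys and emits either the lowercase form or the current character.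
import Mathlib
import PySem

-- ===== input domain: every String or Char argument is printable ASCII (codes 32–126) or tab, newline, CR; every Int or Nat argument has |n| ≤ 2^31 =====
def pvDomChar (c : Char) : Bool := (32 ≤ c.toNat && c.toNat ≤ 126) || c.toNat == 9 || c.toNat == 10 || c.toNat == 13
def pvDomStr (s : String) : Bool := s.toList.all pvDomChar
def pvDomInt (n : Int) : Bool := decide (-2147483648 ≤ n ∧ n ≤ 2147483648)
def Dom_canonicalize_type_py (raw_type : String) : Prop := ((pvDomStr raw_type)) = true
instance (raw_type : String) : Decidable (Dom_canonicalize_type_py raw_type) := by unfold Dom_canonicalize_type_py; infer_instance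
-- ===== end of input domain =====

-- B replaces A's six sequential full-string `.replace` passes by one single left-to-right
-- scan that tries the six alias keys at each position (objective: alternative, same cost).

-- ===== PORT A =====
-- literal transliteration of A: strip, then one str.replace pass per alias, in dict order
def canonicalize_type_py (raw_type : String) : String :=
  let t := PySem.Str.strip raw_type
  let t := PySem.Str.replace t "List[" "list["
  let t := PySem.Str.replace t "Dict[" "dict["
  let t := PySem.Str.replace t "Set[" "set["
  let t := PySem.Str.replace t "Tuple[" "tuple["
  let t := PySem.Str.replace t "Optional[" "opt["
  let t := PySem.Str.replace t "Union[" "union["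
  t

-- ===== PORT B =====
-- the while-loop of Source B: at each position try the six keys in order; on a match emit the
-- lowercase form and jump past the key, otherwise emit the character and advance by one
def pvScanB : List Char → List Char
  | [] => []
  | c :: t =>
    if List.isPrefixOf ['L','i','s','t','['] (c :: t) then
      ['l','i','s','t','['] ++ pvScanB (t.drop 4)
    else if List.isPrefixOf ['D','i','c','t','['] (c :: t) then
      ['d','i','c','t','['] ++ pvScanB (t.drop 4)
    else if List.isPrefixOf ['S','e','t','['] (c :: t) then
      ['s','e','t','['] ++ pvScanB (t.drop 3)
    else if List.isPrefixOf ['T','u','p','l','e','['] (c :: t) then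
      ['t','u','p','l','e','['] ++ pvScanB (t.drop 5)
    else if List.isPrefixOf ['O','p','t','i','o','n','a','l','['] (c :: t) then
      ['o','p','t','['] ++ pvScanB (t.drop 8)
    else if List.isPrefixOf ['U','n','i','o','n','['] (c :: t) then
      ['u','n','i','o','n','['] ++ pvScanB (t.drop 5)
    else
      c :: pvScanB t
  termination_by l => l.length
  decreasing_by all_goals (simp [List.length_drop]; try omega)

def canonicalize_type_py_alt (raw_type : String) : String :=
  String.ofList (pvScanB (PySem.Str.strip raw_type).toList)

-- ===== PRECONDITION & SPEC =====
def Spec_canonicalize_type_py (raw_type : String) (out : String) : Prop := out = canonicalize_type_py_alt raw_type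
instance (raw_type : String) (out : String) : Decidable (Spec_canonicalize_type_py raw_type out) := by unfold Spec_canonicalize_type_py; infer_instance

-- ===== CLAIM (what is proved, stated in full; the proofs are below) =====
def Claim_equal_canonicalize_type_py : Prop := ∀ (raw_type : String), Dom_canonicalize_type_py raw_type → Spec_canonicalize_type_py raw_type (canonicalize_type_py raw_type)

-- ===== LEMMAS AND PROOFS =====

-- a clean structural version of PySem.Chars.replace for a nonempty needle o::os
def pvRepl (o : Char) (os v : List Char) : List Char → List Char
  | [] => []
  | c :: t =>
    if List.isPrefixOf (o :: os) (c :: t) then v ++ pvRepl o os v (t.drop os.length)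
    else c :: pvRepl o os v t
  termination_by l => l.length
  decreasing_by all_goals (simp [List.length_drop]; try omega)

theorem pvGo_eq (o : Char) (os v : List Char) :
    ∀ (fuel : Nat) (l acc : List Char), l.length ≤ fuel →
      PySem.Chars.replace.go (o :: os) v fuel l acc = acc.reverse ++ pvRepl o os v l := by
  intro fuel
  induction fuel with
  | zero =>
    intro l acc h
    have : l = [] := List.length_eq_zero_iff.mp (Nat.le_zero.mp h)
    subst this
    rw [PySem.Chars.replace.go, pvRepl]
  | succ n ih =>
    intro l acc h
    cases l with
    | nil => rw [PySem.Chars.replace.go, pvRepl]; simp; omega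
    | cons c t =>
      rw [PySem.Chars.replace.go, pvRepl]
      by_cases hp : List.isPrefixOf (o :: os) (c :: t) = true
      · simp only [hp, if_true]
        have hlen : (List.drop (o :: os).length (c :: t)).length ≤ n := by
          simp [List.length_drop] at *
          omega
        rw [ih _ _ hlen]
        simp [List.length_cons]
      · simp only [hp, if_false, Bool.false_eq_true]
        have hlen : t.length ≤ n := by simp at h; omega
        rw [ih _ _ hlen]
        simp

theorem pvReplace_eq (o : Char) (os v s : List Char) :
    PySem.Chars.replace s (o :: os) v = pvRepl o os v s := by
  rw [PySem.Chars.replace]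
  simp only [List.isEmpty_cons, Bool.false_eq_true, if_false]
  exact pvGo_eq o os v s.length s [] (le_refl _)

-- pvRepl copies a block none of whose characters equals the needle's first character
theorem pvRepl_skip (o : Char) (os v : List Char) :
    ∀ (p x : List Char), o ∉ p →
      pvRepl o os v (p ++ x) = p ++ pvRepl o os v x := by
  intro p
  induction p with
  | nil => intro x _; simp
  | cons a p ih =>
    intro x h
    have ha : a ≠ o := fun he => h (by simp [he])
    rw [List.cons_append, pvRepl]
    have hnp : List.isPrefixOf (o :: os) (a :: (p ++ x)) = false := by
      simp [List.isPrefixOf]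
      intro he; exact absurd he.symm ha
    simp only [hnp, Bool.false_eq_true, if_false]
    rw [ih x (fun hc => h (List.mem_cons_of_mem a hc))]
    simp

theorem pvRepl_match (o : Char) (os v x : List Char) :
    pvRepl o os v ((o :: os) ++ x) = v ++ pvRepl o os v x := by
  rw [List.cons_append, pvRepl]
  have hp : List.isPrefixOf (o :: os) (o :: (os ++ x)) = true := by
    rw [List.isPrefixOf_iff_prefix]
    exact List.prefix_append _ _
  simp only [hp, if_true]
  rw [List.drop_left]

-- S: the nonempty proper suffixes of the six alias keys (their tails and all shorter suffixes)
def pvS : List (List Char) :=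
  [['i','s','t','['], ['s','t','['], ['t','['], ['['],
   ['i','c','t','['], ['c','t','['],
   ['e','t','['],
   ['u','p','l','e','['], ['p','l','e','['], ['l','e','['], ['e','['],
   ['p','t','i','o','n','a','l','['], ['t','i','o','n','a','l','['], ['i','o','n','a','l','['],
   ['o','n','a','l','['], ['n','a','l','['], ['a','l','['], ['l','['],
   ['n','i','o','n','['], ['i','o','n','['], ['o','n','['], ['n','[']]

theorem pvS_ne_nil : ∀ w ∈ pvS, w ≠ [] := by decide
theorem pvS_tail : ∀ w ∈ pvS, w.tail = [] ∨ w.tail ∈ pvS := by decide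

-- no suffix in pvS is a prefix of a replacement value v, nor v of it ⇒ a replacement
-- output can never take part in a later match: pvRepl creates no new occurrence of a suffix
theorem pvNewmatch (o : Char) (os v : List Char)
    (hv : ∀ w ∈ pvS, ¬ w <+: v ∧ ¬ v <+: w) :
    ∀ (n : Nat) (t : List Char), t.length ≤ n →
      ∀ w ∈ pvS, w <+: pvRepl o os v t → w <+: t := by
  intro n
  induction n with
  | zero =>
    intro t ht w _ hw
    have : t = [] := List.length_eq_zero_iff.mp (Nat.le_zero.mp ht)
    subst this
    rw [pvRepl] at hw
    exact hw
  | succ n ih =>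
    intro t ht w hwS hw
    cases t with
    | nil => rw [pvRepl] at hw; exact hw
    | cons c t2 =>
      rw [pvRepl] at hw
      by_cases hp : List.isPrefixOf (o :: os) (c :: t2) = true
      · simp only [hp, if_true] at hw
        exfalso
        rcases List.prefix_or_prefix_of_prefix hw (List.prefix_append v _) with h | h
        · exact (hv w hwS).1 h
        · exact (hv w hwS).2 h
      · simp only [hp, Bool.false_eq_true, if_false] at hw
        -- w is nonempty (check over the literal list pvS)
        have hwne : w ≠ [] := pvS_ne_nil w hwS
        cases w with
        | nil => exact absurd rfl hwne
        | cons a w' =>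
          rcases hw with ⟨z, hz⟩
          rw [List.cons_append] at hz
          injection hz with h1 h2
          subst h1
          cases w' with
          | nil => exact ⟨t2, rfl⟩
          | cons b w2 =>
            have hw'S : (b :: w2) ∈ pvS := by
              rcases pvS_tail _ hwS with h | h
              · simp at h
              · simpa using h
            have hw'pre : (b :: w2) <+: pvRepl o os v t2 := ⟨z, h2⟩
            have ht2 : t2.length ≤ n := by simp at ht; omega
            have := ih t2 ht2 (b :: w2) hw'S hw'pre
            rcases this with ⟨z2, hz2⟩
            exact ⟨z2, by rw [List.cons_append, hz2]⟩

-- the A-side pipeline at the character-list level, in A's order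
def pvR1 (l : List Char) : List Char := pvRepl 'L' ['i','s','t','['] ['l','i','s','t','['] l
def pvR2 (l : List Char) : List Char := pvRepl 'D' ['i','c','t','['] ['d','i','c','t','['] l
def pvR3 (l : List Char) : List Char := pvRepl 'S' ['e','t','['] ['s','e','t','['] l
def pvR4 (l : List Char) : List Char := pvRepl 'T' ['u','p','l','e','['] ['t','u','p','l','e','['] l
def pvR5 (l : List Char) : List Char := pvRepl 'O' ['p','t','i','o','n','a','l','['] ['o','p','t','['] l
def pvR6 (l : List Char) : List Char := pvRepl 'U' ['n','i','o','n','['] ['u','n','i','o','n','['] l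
def pvA6 (l : List Char) : List Char := pvR6 (pvR5 (pvR4 (pvR3 (pvR2 (pvR1 l)))))

theorem pvHv1 : ∀ w ∈ pvS, ¬ w <+: ['l','i','s','t','['] ∧ ¬ ['l','i','s','t','['] <+: w := by decide
theorem pvHv2 : ∀ w ∈ pvS, ¬ w <+: ['d','i','c','t','['] ∧ ¬ ['d','i','c','t','['] <+: w := by decide
theorem pvHv3 : ∀ w ∈ pvS, ¬ w <+: ['s','e','t','['] ∧ ¬ ['s','e','t','['] <+: w := by decide
theorem pvHv4 : ∀ w ∈ pvS, ¬ w <+: ['t','u','p','l','e','['] ∧ ¬ ['t','u','p','l','e','['] <+: w := by decide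
theorem pvHv5 : ∀ w ∈ pvS, ¬ w <+: ['o','p','t','['] ∧ ¬ ['o','p','t','['] <+: w := by decide

theorem pvNM1 (t : List Char) (w : List Char) (hw : w ∈ pvS) :
    w <+: pvR1 t → w <+: t := fun h =>
  pvNewmatch _ _ _ pvHv1 t.length t (le_refl _) w hw h
theorem pvNM2 (t : List Char) (w : List Char) (hw : w ∈ pvS) :
    w <+: pvR2 t → w <+: t := fun h =>
  pvNewmatch _ _ _ pvHv2 t.length t (le_refl _) w hw h
theorem pvNM3 (t : List Char) (w : List Char) (hw : w ∈ pvS) :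
    w <+: pvR3 t → w <+: t := fun h =>
  pvNewmatch _ _ _ pvHv3 t.length t (le_refl _) w hw h
theorem pvNM4 (t : List Char) (w : List Char) (hw : w ∈ pvS) :
    w <+: pvR4 t → w <+: t := fun h =>
  pvNewmatch _ _ _ pvHv4 t.length t (le_refl _) w hw h
theorem pvNM5 (t : List Char) (w : List Char) (hw : w ∈ pvS) :
    w <+: pvR5 t → w <+: t := fun h =>
  pvNewmatch _ _ _ pvHv5 t.length t (le_refl _) w hw h

theorem pvA6_match1 (rest : List Char) : pvA6 (['L','i','s','t','['] ++ rest) = ['l','i','s','t','['] ++ pvA6 rest := by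
  unfold pvA6 pvR1 pvR2 pvR3 pvR4 pvR5 pvR6
  rw [pvRepl_match]
  rw [pvRepl_skip 'D' ['i','c','t','['] ['d','i','c','t','['] ['l','i','s','t','['] _ (by decide)]
  rw [pvRepl_skip 'S' ['e','t','['] ['s','e','t','['] ['l','i','s','t','['] _ (by decide)]
  rw [pvRepl_skip 'T' ['u','p','l','e','['] ['t','u','p','l','e','['] ['l','i','s','t','['] _ (by decide)]
  rw [pvRepl_skip 'O' ['p','t','i','o','n','a','l','['] ['o','p','t','['] ['l','i','s','t','['] _ (by decide)]
  rw [pvRepl_skip 'U' ['n','i','o','n','['] ['u','n','i','o','n','['] ['l','i','s','t','['] _ (by decide)]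

theorem pvA6_match2 (rest : List Char) : pvA6 (['D','i','c','t','['] ++ rest) = ['d','i','c','t','['] ++ pvA6 rest := by
  unfold pvA6 pvR1 pvR2 pvR3 pvR4 pvR5 pvR6
  rw [pvRepl_skip 'L' ['i','s','t','['] ['l','i','s','t','['] ['D','i','c','t','['] _ (by decide)]
  rw [pvRepl_match]
  rw [pvRepl_skip 'S' ['e','t','['] ['s','e','t','['] ['d','i','c','t','['] _ (by decide)]
  rw [pvRepl_skip 'T' ['u','p','l','e','['] ['t','u','p','l','e','['] ['d','i','c','t','['] _ (by decide)]
  rw [pvRepl_skip 'O' ['p','t','i','o','n','a','l','['] ['o','p','t','['] ['d','i','c','t','['] _ (by decide)]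
  rw [pvRepl_skip 'U' ['n','i','o','n','['] ['u','n','i','o','n','['] ['d','i','c','t','['] _ (by decide)]

theorem pvA6_match3 (rest : List Char) : pvA6 (['S','e','t','['] ++ rest) = ['s','e','t','['] ++ pvA6 rest := by
  unfold pvA6 pvR1 pvR2 pvR3 pvR4 pvR5 pvR6
  rw [pvRepl_skip 'L' ['i','s','t','['] ['l','i','s','t','['] ['S','e','t','['] _ (by decide)]
  rw [pvRepl_skip 'D' ['i','c','t','['] ['d','i','c','t','['] ['S','e','t','['] _ (by decide)]
  rw [pvRepl_match]
  rw [pvRepl_skip 'T' ['u','p','l','e','['] ['t','u','p','l','e','['] ['s','e','t','['] _ (by decide)]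
  rw [pvRepl_skip 'O' ['p','t','i','o','n','a','l','['] ['o','p','t','['] ['s','e','t','['] _ (by decide)]
  rw [pvRepl_skip 'U' ['n','i','o','n','['] ['u','n','i','o','n','['] ['s','e','t','['] _ (by decide)]

theorem pvA6_match4 (rest : List Char) : pvA6 (['T','u','p','l','e','['] ++ rest) = ['t','u','p','l','e','['] ++ pvA6 rest := by
  unfold pvA6 pvR1 pvR2 pvR3 pvR4 pvR5 pvR6
  rw [pvRepl_skip 'L' ['i','s','t','['] ['l','i','s','t','['] ['T','u','p','l','e','['] _ (by decide)]
  rw [pvRepl_skip 'D' ['i','c','t','['] ['d','i','c','t','['] ['T','u','p','l','e','['] _ (by decide)]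
  rw [pvRepl_skip 'S' ['e','t','['] ['s','e','t','['] ['T','u','p','l','e','['] _ (by decide)]
  rw [pvRepl_match]
  rw [pvRepl_skip 'O' ['p','t','i','o','n','a','l','['] ['o','p','t','['] ['t','u','p','l','e','['] _ (by decide)]
  rw [pvRepl_skip 'U' ['n','i','o','n','['] ['u','n','i','o','n','['] ['t','u','p','l','e','['] _ (by decide)]

theorem pvA6_match5 (rest : List Char) : pvA6 (['O','p','t','i','o','n','a','l','['] ++ rest) = ['o','p','t','['] ++ pvA6 rest := by
  unfold pvA6 pvR1 pvR2 pvR3 pvR4 pvR5 pvR6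
  rw [pvRepl_skip 'L' ['i','s','t','['] ['l','i','s','t','['] ['O','p','t','i','o','n','a','l','['] _ (by decide)]
  rw [pvRepl_skip 'D' ['i','c','t','['] ['d','i','c','t','['] ['O','p','t','i','o','n','a','l','['] _ (by decide)]
  rw [pvRepl_skip 'S' ['e','t','['] ['s','e','t','['] ['O','p','t','i','o','n','a','l','['] _ (by decide)]
  rw [pvRepl_skip 'T' ['u','p','l','e','['] ['t','u','p','l','e','['] ['O','p','t','i','o','n','a','l','['] _ (by decide)]
  rw [pvRepl_match]
  rw [pvRepl_skip 'U' ['n','i','o','n','['] ['u','n','i','o','n','['] ['o','p','t','['] _ (by decide)]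

theorem pvA6_match6 (rest : List Char) : pvA6 (['U','n','i','o','n','['] ++ rest) = ['u','n','i','o','n','['] ++ pvA6 rest := by
  unfold pvA6 pvR1 pvR2 pvR3 pvR4 pvR5 pvR6
  rw [pvRepl_skip 'L' ['i','s','t','['] ['l','i','s','t','['] ['U','n','i','o','n','['] _ (by decide)]
  rw [pvRepl_skip 'D' ['i','c','t','['] ['d','i','c','t','['] ['U','n','i','o','n','['] _ (by decide)]
  rw [pvRepl_skip 'S' ['e','t','['] ['s','e','t','['] ['U','n','i','o','n','['] _ (by decide)]
  rw [pvRepl_skip 'T' ['u','p','l','e','['] ['t','u','p','l','e','['] ['U','n','i','o','n','['] _ (by decide)]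
  rw [pvRepl_skip 'O' ['p','t','i','o','n','a','l','['] ['o','p','t','['] ['U','n','i','o','n','['] _ (by decide)]
  rw [pvRepl_match]

theorem pvScanB_match1 (rest : List Char) : pvScanB (['L','i','s','t','['] ++ rest) = ['l','i','s','t','['] ++ pvScanB rest := by
  simp only [List.cons_append, List.nil_append]
  rw [pvScanB]
  simp [List.isPrefixOf]

theorem pvScanB_match2 (rest : List Char) : pvScanB (['D','i','c','t','['] ++ rest) = ['d','i','c','t','['] ++ pvScanB rest := by
  simp only [List.cons_append, List.nil_append]
  rw [pvScanB]
  simp [List.isPrefixOf]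

theorem pvScanB_match3 (rest : List Char) : pvScanB (['S','e','t','['] ++ rest) = ['s','e','t','['] ++ pvScanB rest := by
  simp only [List.cons_append, List.nil_append]
  rw [pvScanB]
  simp [List.isPrefixOf]

theorem pvScanB_match4 (rest : List Char) : pvScanB (['T','u','p','l','e','['] ++ rest) = ['t','u','p','l','e','['] ++ pvScanB rest := by
  simp only [List.cons_append, List.nil_append]
  rw [pvScanB]
  simp [List.isPrefixOf]

theorem pvScanB_match5 (rest : List Char) : pvScanB (['O','p','t','i','o','n','a','l','['] ++ rest) = ['o','p','t','['] ++ pvScanB rest := by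
  simp only [List.cons_append, List.nil_append]
  rw [pvScanB]
  simp [List.isPrefixOf]

theorem pvScanB_match6 (rest : List Char) : pvScanB (['U','n','i','o','n','['] ++ rest) = ['u','n','i','o','n','['] ++ pvScanB rest := by
  simp only [List.cons_append, List.nil_append]
  rw [pvScanB]
  simp [List.isPrefixOf]

theorem pvA6_cons (c : Char) (t2 : List Char) (h1 : ¬ ['L','i','s','t','['] <+: (c :: t2)) (h2 : ¬ ['D','i','c','t','['] <+: (c :: t2)) (h3 : ¬ ['S','e','t','['] <+: (c :: t2)) (h4 : ¬ ['T','u','p','l','e','['] <+: (c :: t2)) (h5 : ¬ ['O','p','t','i','o','n','a','l','['] <+: (c :: t2)) (h6 : ¬ ['U','n','i','o','n','['] <+: (c :: t2)) :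
    pvA6 (c :: t2) = c :: pvA6 t2 := by
  have e1 : pvR1 (c :: t2) = c :: pvR1 t2 := by
    unfold pvR1; rw [pvRepl]
    refine if_neg (fun hT => ?_)
    rw [List.isPrefixOf_iff_prefix, List.cons_prefix_cons] at hT
    exact h1 (List.cons_prefix_cons.mpr ⟨hT.1, hT.2⟩)
  have e2 : pvR2 (c :: (pvR1 t2)) = c :: pvR2 (pvR1 t2) := by
    unfold pvR2; rw [pvRepl]
    refine if_neg (fun hT => ?_)
    rw [List.isPrefixOf_iff_prefix, List.cons_prefix_cons] at hT
    exact h2 (List.cons_prefix_cons.mpr ⟨hT.1, pvNM1 _ ['i','c','t','['] (by decide) (hT.2)⟩)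
  have e3 : pvR3 (c :: (pvR2 (pvR1 t2))) = c :: pvR3 (pvR2 (pvR1 t2)) := by
    unfold pvR3; rw [pvRepl]
    refine if_neg (fun hT => ?_)
    rw [List.isPrefixOf_iff_prefix, List.cons_prefix_cons] at hT
    exact h3 (List.cons_prefix_cons.mpr ⟨hT.1, pvNM1 _ ['e','t','['] (by decide) (pvNM2 _ ['e','t','['] (by decide) (hT.2))⟩)
  have e4 : pvR4 (c :: (pvR3 (pvR2 (pvR1 t2)))) = c :: pvR4 (pvR3 (pvR2 (pvR1 t2))) := by
    unfold pvR4; rw [pvRepl]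
    refine if_neg (fun hT => ?_)
    rw [List.isPrefixOf_iff_prefix, List.cons_prefix_cons] at hT
    exact h4 (List.cons_prefix_cons.mpr ⟨hT.1, pvNM1 _ ['u','p','l','e','['] (by decide) (pvNM2 _ ['u','p','l','e','['] (by decide) (pvNM3 _ ['u','p','l','e','['] (by decide) (hT.2)))⟩)
  have e5 : pvR5 (c :: (pvR4 (pvR3 (pvR2 (pvR1 t2))))) = c :: pvR5 (pvR4 (pvR3 (pvR2 (pvR1 t2)))) := by
    unfold pvR5; rw [pvRepl]
    refine if_neg (fun hT => ?_)
    rw [List.isPrefixOf_iff_prefix, List.cons_prefix_cons] at hT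
    exact h5 (List.cons_prefix_cons.mpr ⟨hT.1, pvNM1 _ ['p','t','i','o','n','a','l','['] (by decide) (pvNM2 _ ['p','t','i','o','n','a','l','['] (by decide) (pvNM3 _ ['p','t','i','o','n','a','l','['] (by decide) (pvNM4 _ ['p','t','i','o','n','a','l','['] (by decide) (hT.2))))⟩)
  have e6 : pvR6 (c :: (pvR5 (pvR4 (pvR3 (pvR2 (pvR1 t2)))))) = c :: pvR6 (pvR5 (pvR4 (pvR3 (pvR2 (pvR1 t2))))) := by
    unfold pvR6; rw [pvRepl]
    refine if_neg (fun hT => ?_)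
    rw [List.isPrefixOf_iff_prefix, List.cons_prefix_cons] at hT
    exact h6 (List.cons_prefix_cons.mpr ⟨hT.1, pvNM1 _ ['n','i','o','n','['] (by decide) (pvNM2 _ ['n','i','o','n','['] (by decide) (pvNM3 _ ['n','i','o','n','['] (by decide) (pvNM4 _ ['n','i','o','n','['] (by decide) (pvNM5 _ ['n','i','o','n','['] (by decide) (hT.2)))))⟩)
  unfold pvA6
  rw [e1, e2, e3, e4, e5, e6]

theorem pvScanB_cons (c : Char) (t2 : List Char) (h1 : ¬ ['L','i','s','t','['] <+: (c :: t2)) (h2 : ¬ ['D','i','c','t','['] <+: (c :: t2)) (h3 : ¬ ['S','e','t','['] <+: (c :: t2)) (h4 : ¬ ['T','u','p','l','e','['] <+: (c :: t2)) (h5 : ¬ ['O','p','t','i','o','n','a','l','['] <+: (c :: t2)) (h6 : ¬ ['U','n','i','o','n','['] <+: (c :: t2)) :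
    pvScanB (c :: t2) = c :: pvScanB t2 := by
  rw [pvScanB]
  rw [if_neg (fun hT => h1 (List.isPrefixOf_iff_prefix.mp hT))]
  rw [if_neg (fun hT => h2 (List.isPrefixOf_iff_prefix.mp hT))]
  rw [if_neg (fun hT => h3 (List.isPrefixOf_iff_prefix.mp hT))]
  rw [if_neg (fun hT => h4 (List.isPrefixOf_iff_prefix.mp hT))]
  rw [if_neg (fun hT => h5 (List.isPrefixOf_iff_prefix.mp hT))]
  rw [if_neg (fun hT => h6 (List.isPrefixOf_iff_prefix.mp hT))]

theorem pvA6_nil : pvA6 [] = [] := by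
  unfold pvA6 pvR1 pvR2 pvR3 pvR4 pvR5 pvR6
  rw [pvRepl]; rw [pvRepl]; rw [pvRepl]; rw [pvRepl]; rw [pvRepl]; rw [pvRepl]

theorem pvScanB_nil : pvScanB [] = [] := by rw [pvScanB]

-- main lemma: six sequential pvRepl passes equal the single scan
theorem pvMain : ∀ (n : Nat) (t : List Char), t.length ≤ n → pvA6 t = pvScanB t := by
  intro n
  induction n with
  | zero =>
    intro t ht
    have : t = [] := List.length_eq_zero_iff.mp (Nat.le_zero.mp ht)
    subst this
    rw [pvA6_nil, pvScanB_nil]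
  | succ n ih =>
    intro t ht
    cases t with
    | nil => rw [pvA6_nil, pvScanB_nil]
    | cons c t2 =>
      by_cases h1 : ['L','i','s','t','['] <+: (c :: t2)
      · obtain ⟨rest, hrest⟩ := h1
        rw [← hrest, pvA6_match1, pvScanB_match1]
        congr 1
        apply ih
        have hl := congrArg List.length hrest
        simp at hl ht
        omega
      · by_cases h2 : ['D','i','c','t','['] <+: (c :: t2)
        · obtain ⟨rest, hrest⟩ := h2
          rw [← hrest, pvA6_match2, pvScanB_match2]
          congr 1
          apply ih
          have hl := congrArg List.length hrest
          simp at hl ht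
          omega
        · by_cases h3 : ['S','e','t','['] <+: (c :: t2)
          · obtain ⟨rest, hrest⟩ := h3
            rw [← hrest, pvA6_match3, pvScanB_match3]
            congr 1
            apply ih
            have hl := congrArg List.length hrest
            simp at hl ht
            omega
          · by_cases h4 : ['T','u','p','l','e','['] <+: (c :: t2)
            · obtain ⟨rest, hrest⟩ := h4
              rw [← hrest, pvA6_match4, pvScanB_match4]
              congr 1
              apply ih
              have hl := congrArg List.length hrest
              simp at hl ht
              omega
            · by_cases h5 : ['O','p','t','i','o','n','a','l','['] <+: (c :: t2)
              · obtain ⟨rest, hrest⟩ := h5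
                rw [← hrest, pvA6_match5, pvScanB_match5]
                congr 1
                apply ih
                have hl := congrArg List.length hrest
                simp at hl ht
                omega
              · by_cases h6 : ['U','n','i','o','n','['] <+: (c :: t2)
                · obtain ⟨rest, hrest⟩ := h6
                  rw [← hrest, pvA6_match6, pvScanB_match6]
                  congr 1
                  apply ih
                  have hl := congrArg List.length hrest
                  simp at hl ht
                  omega
                · rw [pvA6_cons c t2 h1 h2 h3 h4 h5 h6, pvScanB_cons c t2 h1 h2 h3 h4 h5 h6]
                  congr 1
                  apply ih
                  simp at ht
                  omega

-- ===== VERDICT (by name: the statement is the Claim_ definition above) =====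
theorem canonicalize_type_py_spec : Claim_equal_canonicalize_type_py := by
  intro raw _
  unfold Spec_canonicalize_type_py canonicalize_type_py canonicalize_type_py_alt
  rw [← String.toList_inj]
  simp only [PySem.Str.toList_replace, PySem.Str.toList_strip, String.toList_ofList]
  have hL : ("List[" : String).toList = ['L','i','s','t','['] := by decide
  have hl : ("list[" : String).toList = ['l','i','s','t','['] := by decide
  have hD : ("Dict[" : String).toList = ['D','i','c','t','['] := by decide
  have hd : ("dict[" : String).toList = ['d','i','c','t','['] := by decide
  have hS : ("Set[" : String).toList = ['S','e','t','['] := by decide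
  have hs : ("set[" : String).toList = ['s','e','t','['] := by decide
  have hT : ("Tuple[" : String).toList = ['T','u','p','l','e','['] := by decide
  have ht : ("tuple[" : String).toList = ['t','u','p','l','e','['] := by decide
  have hO : ("Optional[" : String).toList = ['O','p','t','i','o','n','a','l','['] := by decide
  have ho : ("opt[" : String).toList = ['o','p','t','['] := by decide
  have hU : ("Union[" : String).toList = ['U','n','i','o','n','['] := by decide
  have hu : ("union[" : String).toList = ['u','n','i','o','n','['] := by decide
  rw [hL, hl, hD, hd, hS, hs, hT, ht, hO, ho, hU, hu]
  simp only [pvReplace_eq]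
  have := pvMain (PySem.Chars.strip raw.toList).length (PySem.Chars.strip raw.toList) (le_refl _)
  unfold pvA6 pvR1 pvR2 pvR3 pvR4 pvR5 pvR6 at this
  exact this
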